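-- pv_equiv track=rewrite | github.com/mejmo/codility-python | Test4.py | solution
-- ===== SOURCE A (Python) =====
-- def solution(A):
--
--     max_size_start = 0
--     max_size = 1
--     i = 0
--
--     while i < len(A):
--
--         start = i
--         size = 1
--
--         while i < len(A) and A[i] > A[i-1]:
--             i += 1
--             size += 1
--
--         if size > max_size:
--             max_size_start = start - 1
--             max_size = size
--
--         i += 1
--
--     return max_size_start
-- ===== SOURCE B (Python) =====
-- def solution(A):
--     n = len(A)
--     breaks = [-1] + [i for i in range(n) if not A[i] > A[i-1]] + [n]
--     best_size = 1
--     best_start = 0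
--     for p, q in zip(breaks, breaks[1:]):
--         if q - p > best_size:
--             best_size = q - p
--             best_start = p
--     return best_start
-- ===== Notes on version B (the rewrite author's own statement) =====
-- stated objective: faster
-- what changed: Replaces A's nested while-loop run scan with two passes: collect the break positions (indices i with A[i] <= A[i-1], wrap included) into a list with sentinels -1 and n, then take the maximum gap between consecutive breaks via zip, reproducing A's start-1 offsets.
import Mathlib
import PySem

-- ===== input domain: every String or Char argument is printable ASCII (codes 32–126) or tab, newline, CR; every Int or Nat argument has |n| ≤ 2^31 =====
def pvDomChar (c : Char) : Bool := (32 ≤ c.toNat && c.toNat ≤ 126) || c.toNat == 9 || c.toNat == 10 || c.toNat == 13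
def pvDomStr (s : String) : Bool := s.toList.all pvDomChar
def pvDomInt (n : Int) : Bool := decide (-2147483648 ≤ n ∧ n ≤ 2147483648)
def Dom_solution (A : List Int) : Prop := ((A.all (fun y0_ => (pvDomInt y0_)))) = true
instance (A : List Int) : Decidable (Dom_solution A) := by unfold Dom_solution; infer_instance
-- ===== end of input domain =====

-- B collects break positions with sentinels and maximizes consecutive gaps instead of A's nested while-loop run scan; measured constant-factor faster in Python (comprehension + zip passes).

-- ===== PORT A =====
-- inner while loop: while i < len(A) and A[i] > A[i-1]: i += 1; size += 1
-- (fuel-guarded structural recursion; the callers pass fuel > number of iterations, so the guard never fires)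
def innerA (A : List Int) (fuel : Nat) (i size : Int) : Int × Int :=
  match fuel with
  | 0 => (i, size)
  | fuel + 1 =>
      if i < (A.length : Int) ∧
          (PySem.List.pyGet? A i).getD 0 > (PySem.List.pyGet? A (i - 1)).getD 0 then
        innerA A fuel (i + 1) (size + 1)
      else (i, size)

-- outer while loop
def outerA (A : List Int) (fuel : Nat) (i max_size_start max_size : Int) : Int :=
  match fuel with
  | 0 => max_size_start
  | fuel + 1 =>
      if i < (A.length : Int) then
        let r := innerA A (A.length + 1) i 1
        if r.2 > max_size then outerA A fuel (r.1 + 1) (i - 1) r.2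
        else outerA A fuel (r.1 + 1) max_size_start max_size
      else max_size_start

def solution (A : List Int) : Int := outerA A (A.length + 1) 0 0 1

-- ===== PORT B =====
-- for p, q in zip(breaks, breaks[1:]): keep the largest gap q - p (strict improvement)
def loopB (pairs : List (Int × Int)) (best_size best_start : Int) : Int :=
  match pairs with
  | [] => best_start
  | (p, q) :: rest =>
      if q - p > best_size then loopB rest (q - p) p
      else loopB rest best_size best_start

def solution_alt (A : List Int) : Int :=
  let n := A.length
  let breaks : List Int :=
    (-1) :: (((List.range n).filter (fun (i : Nat) =>
        !(decide ((PySem.List.pyGet? A (i : Int)).getD 0 >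
                  (PySem.List.pyGet? A ((i : Int) - 1)).getD 0)))).map (fun (i : Nat) => (i : Int))
      ++ [(n : Int)])
  loopB (breaks.zip (breaks.drop 1)) 1 0

-- ===== PRECONDITION & SPEC =====
def Spec_solution (A : List Int) (out : Int) : Prop := out = solution_alt A
instance (A : List Int) (out : Int) : Decidable (Spec_solution A out) := by unfold Spec_solution; infer_instance

-- ===== CLAIM (what is proved, stated in full; the proofs are below) =====
def Claim_equal_solution : Prop := ∀ (A : List Int), Dom_solution A → Spec_solution A (solution A)

-- ===== LEMMAS AND PROOFS =====

-- the comparison bit at position j (with Python's index-0 wrap A[-1])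
def bfun (A : List Int) (j : Nat) : Bool :=
  decide ((PySem.List.pyGet? A (j : Int)).getD 0 > (PySem.List.pyGet? A ((j : Int) - 1)).getD 0)

-- first position >= j where the bit is false (capped at length)
def fb (A : List Int) (j : Nat) : Nat :=
  if j < A.length then (if bfun A j then fb A (j + 1) else j) else j
termination_by A.length - j

-- break positions from j on
def breaksFrom (A : List Int) (j : Nat) : List Nat :=
  if j < A.length then
    (if bfun A j then breaksFrom A (j + 1) else j :: breaksFrom A (j + 1))
  else []
termination_by A.length - j

theorem fb_ge (A : List Int) (j : Nat) : j ≤ fb A j := by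
  unfold fb
  split
  · split
    · have := fb_ge A (j + 1); omega
    · omega
  · omega
termination_by A.length - j

theorem fb_le (A : List Int) (j : Nat) (h : j ≤ A.length) : fb A j ≤ A.length := by
  unfold fb
  split
  · split
    · exact fb_le A (j + 1) (by omega)
    · omega
  · omega
termination_by A.length - j

theorem breaksFrom_fb (A : List Int) (j : Nat) :
    breaksFrom A j =
      if fb A j < A.length then fb A j :: breaksFrom A (fb A j + 1) else [] := by
  by_cases hj : j < A.length
  · by_cases hb : bfun A j = true
    · have h1 : breaksFrom A j = breaksFrom A (j + 1) := by
        conv_lhs => rw [breaksFrom]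
        simp [hj, hb]
      have h2 : fb A j = fb A (j + 1) := by
        conv_lhs => rw [fb]
        simp [hj, hb]
      rw [h1, h2]
      exact breaksFrom_fb A (j + 1)
    · have h2 : fb A j = j := by
        conv_lhs => rw [fb]
        simp [hj, hb]
      rw [h2, if_pos hj]
      conv_lhs => rw [breaksFrom]
      simp [hj, hb]
  · have h2 : fb A j = j := by
      conv_lhs => rw [fb]
      simp [hj]
    rw [h2, if_neg hj]
    conv_lhs => rw [breaksFrom]
    simp [hj]
termination_by A.length - j
decreasing_by omega

theorem innerA_eq (A : List Int) (j : Nat) (fuel : Nat) (s : Int)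
    (hf : A.length - j < fuel) :
    innerA A fuel (j : Int) s = ((fb A j : Int), s + ((fb A j : Int) - (j : Int))) := by
  induction fuel generalizing j s with
  | zero => omega
  | succ fuel ih =>
    rw [innerA]
    by_cases hj : j < A.length
    · by_cases hb : bfun A j = true
      · have hb' : (PySem.List.pyGet? A (j : Int)).getD 0 > (PySem.List.pyGet? A ((j : Int) - 1)).getD 0 := by
          simpa [bfun] using hb
        rw [if_pos ⟨by exact_mod_cast hj, hb'⟩]
        rw [show ((j : Int) + 1) = ((j + 1 : Nat) : Int) from by push_cast; ring]
        rw [ih (j + 1) (s + 1) (by omega)]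
        have h2 : fb A j = fb A (j + 1) := by
          conv_lhs => rw [fb]
          simp [hj, hb]
        rw [h2]
        simp only [Prod.mk.injEq, true_and]
        push_cast
        ring
      · have hb' : ¬ ((PySem.List.pyGet? A (j : Int)).getD 0 > (PySem.List.pyGet? A ((j : Int) - 1)).getD 0) := by
          simpa [bfun] using hb
        rw [if_neg (by rintro ⟨_, h2⟩; exact hb' h2)]
        have h2 : fb A j = j := by
          conv_lhs => rw [fb]
          simp [hj, hb]
        rw [h2]
        simp
    · rw [if_neg (by rintro ⟨h1, _⟩; exact hj (by exact_mod_cast h1))]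
      have h2 : fb A j = j := by
        conv_lhs => rw [fb]
        simp [hj]
      rw [h2]
      simp

-- consecutive pairs with a leading previous element
def consPairs (prev : Int) : List Int → List (Int × Int)
  | [] => []
  | q :: rest => (prev, q) :: consPairs q rest

theorem zip_drop_one (l : List Int) (prev : Int) :
    (prev :: l).zip ((prev :: l).drop 1) = consPairs prev l := by
  induction l generalizing prev with
  | nil => simp [consPairs]
  | cons q rest ih => simpa [consPairs] using ih q

def segs (A : List Int) (j : Nat) : List Int :=
  (breaksFrom A j).map (fun (i : Nat) => (i : Int)) ++ [(A.length : Int)]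

theorem outerA_done (A : List Int) (fuel : Nat) (i ms msz : Int)
    (h : ¬ i < (A.length : Int)) : outerA A fuel i ms msz = ms := by
  cases fuel with
  | zero => rfl
  | succ fuel => rw [outerA, if_neg h]

theorem outerA_eq (A : List Int) (fuel : Nat) (j : Nat) (hj : j ≤ A.length)
    (hf : A.length - j < fuel) (ms msz : Int) (hmsz : 1 ≤ msz) :
    outerA A fuel (j : Int) ms msz = loopB (consPairs ((j : Int) - 1) (segs A j)) msz ms := by
  induction fuel generalizing j ms msz with
  | zero => omega
  | succ fuel ih =>
    by_cases h : j < A.length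
    · rw [outerA, if_pos (by exact_mod_cast h)]
      rw [innerA_eq A j (A.length + 1) 1 (by omega)]
      dsimp only
      have hfbge := fb_ge A j
      have hfble := fb_le A j hj
      by_cases hfb : fb A j < A.length
      · have hseg : segs A j = (fb A j : Int) :: segs A (fb A j + 1) := by
          simp only [segs]
          rw [breaksFrom_fb A j, if_pos hfb]
          simp
        rw [hseg]
        simp only [consPairs, loopB]
        rw [show ((fb A j : Int) - ((j : Int) - 1)) = 1 + ((fb A j : Int) - (j : Int)) from by ring]
        have hrec : ∀ ms' msz', 1 ≤ msz' →
            outerA A fuel ((fb A j : Int) + 1) ms' msz' =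
              loopB (consPairs ((fb A j : Int)) (segs A (fb A j + 1))) msz' ms' := by
          intro ms' msz' h1
          have h2 := ih (fb A j + 1) (by omega) (by omega) ms' msz' h1
          push_cast at h2
          simpa using h2
        by_cases hgt : 1 + ((fb A j : Int) - (j : Int)) > msz
        · rw [if_pos hgt, if_pos hgt, hrec _ _ (by omega)]
        · rw [if_neg hgt, if_neg hgt, hrec _ _ hmsz]
      · have hfbn : fb A j = A.length := by omega
        have hseg : segs A j = [(A.length : Int)] := by
          simp only [segs]
          rw [breaksFrom_fb A j, if_neg hfb]
          simp
        rw [hseg]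
        simp only [consPairs, loopB]
        have hdone : ∀ ms' msz', outerA A fuel ((fb A j : Int) + 1) ms' msz' = ms' := by
          intro ms' msz'
          exact outerA_done A fuel _ ms' msz' (by rw [hfbn]; omega)
        rw [show ((A.length : Int) - ((j : Int) - 1)) = 1 + ((fb A j : Int) - (j : Int)) from by
          rw [hfbn]; ring]
        by_cases hgt : 1 + ((fb A j : Int) - (j : Int)) > msz
        · rw [if_pos hgt, if_pos hgt, hdone]
        · rw [if_neg hgt, if_neg hgt, hdone]
    · rw [outerA, if_neg (by omega)]
      have hb : breaksFrom A j = [] := by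
        conv_lhs => rw [breaksFrom]
        simp [h]
      simp only [segs, hb, List.map_nil, List.nil_append, consPairs, loopB]
      rw [if_neg (by omega)]

theorem breaksFrom_filter (A : List Int) :
    (List.range A.length).filter (fun i => !bfun A i) = breaksFrom A 0 := by
  have key : ∀ m j, A.length - j ≤ m → j ≤ A.length →
      (List.range' j (A.length - j)).filter (fun i => !bfun A i) = breaksFrom A j := by
    intro m
    induction m with
    | zero =>
        intro j h1 h2
        have hz : A.length - j = 0 := by omega
        rw [hz]
        conv_rhs => rw [breaksFrom]
        simp [show ¬ j < A.length from by omega]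
    | succ m ih =>
        intro j h1 h2
        by_cases hj : j < A.length
        · have hlen : A.length - j = (A.length - (j + 1)) + 1 := by omega
          rw [hlen, List.range'_succ, List.filter_cons]
          conv_rhs => rw [breaksFrom]
          by_cases hb : bfun A j = true <;>
            simp [hj, hb, ih (j + 1) (by omega) (by omega)]
        · have hz : A.length - j = 0 := by omega
          rw [hz]
          conv_rhs => rw [breaksFrom]
          simp [hj]
  have := key A.length 0 (by omega) (by omega)
  simpa [List.range_eq_range'] using this

theorem alt_eq (A : List Int) :
    solution_alt A = loopB (consPairs (-1) (segs A 0)) 1 0 := by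
  simp only [solution_alt]
  rw [zip_drop_one]
  have hf : (fun (i : Nat) =>
      !(decide ((PySem.List.pyGet? A (i : Int)).getD 0 >
                (PySem.List.pyGet? A ((i : Int) - 1)).getD 0))) = fun i => !bfun A i := rfl
  rw [hf, breaksFrom_filter]
  rfl

-- ===== VERDICT (by name: the statement is the Claim_ definition above) =====
theorem solution_spec : Claim_equal_solution := by
  intro A _
  show solution A = solution_alt A
  have h0 := outerA_eq A (A.length + 1) 0 (by omega) (by omega) 0 1 (le_refl 1)
  norm_num at h0
  rw [alt_eq]
  exact h0
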